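-- pv_equiv track=rewrite | github.com/JohnForbes/xgu | xgu/f/string/filepath/to_import_paths.py | f
-- ===== SOURCE A (Python) =====
-- def f(x):
--   x = x[2:-3]
--   _ = x.split('/')
--   q = set([])
--   while len(_):
--     q.add('.'.join(_))
--     _ = _[1:]
--   return q
-- ===== SOURCE B (Python) =====
-- def f(x):
--   parts = x[2:-3].split('/')
--   sufs = []
--   acc = None
--   for p in reversed(parts):
--     acc = p if acc is None else p + '.' + acc
--     sufs.append(acc)
--   return set(reversed(sufs))
-- ===== Notes on version B (the rewrite author's own statement) =====
-- stated objective: alternative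
-- what changed: Instead of repeatedly dot-joining the whole remaining list and dropping its head, B walks the parts back-to-front once, maintaining a running suffix string extended by one part per step, and collects each running suffix.
import Mathlib
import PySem

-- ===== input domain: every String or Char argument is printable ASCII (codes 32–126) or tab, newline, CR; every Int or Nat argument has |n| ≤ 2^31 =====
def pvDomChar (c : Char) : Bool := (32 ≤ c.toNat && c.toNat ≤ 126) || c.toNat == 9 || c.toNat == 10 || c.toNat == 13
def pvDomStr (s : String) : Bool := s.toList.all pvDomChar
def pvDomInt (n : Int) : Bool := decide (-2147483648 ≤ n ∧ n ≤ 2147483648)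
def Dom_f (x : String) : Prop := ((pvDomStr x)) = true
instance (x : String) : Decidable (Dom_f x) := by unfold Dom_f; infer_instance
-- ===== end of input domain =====

-- B replaces A's front-drop loop of repeated full dot-joins by a single back-to-front pass
-- maintaining a running suffix string (objective: alternative decomposition, not speed).
-- Both programs return a Python set; equality of the ports' element lists is proved.

-- ===== PORT A =====
-- while len(_): q.add('.'.join(_)); _ = _[1:]
def fLoop : PySem.Set String → List String → PySem.Set String
  | q, [] => q
  | q, a :: t => fLoop (PySem.Set.add q (PySem.Str.join "." (a :: t)))
      (PySem.List.slice (a :: t) (some 1) none)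
  termination_by _ l => l.length
  decreasing_by simp [PySem.List.slice_from]

def f (x : String) : List String :=
  let x' := PySem.Str.slice x (some 2) (some (-3))
  -- sep "/" is nonempty, so x'.split('/') never raises: split? is always `some`
  let parts := (PySem.Str.split? x' "/").getD []
  fLoop PySem.Set.empty parts

-- ===== PORT B =====
-- exact port of Python's `p + '.' + a` (string concatenation of code points)
def dotPlus (p a : String) : String := String.ofList (p.toList ++ '.' :: a.toList)

def f_alt (x : String) : List String :=
  let parts := (PySem.Str.split? (PySem.Str.slice x (some 2) (some (-3))) "/").getD []
  let st := parts.reverse.foldl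
    (fun (st : List String × Option String) p =>
      let acc := match st.2 with
        | none => p
        | some a => dotPlus p a
      (st.1 ++ [acc], some acc)) ([], none)
  PySem.Set.ofList st.1.reverse

-- ===== PRECONDITION & SPEC =====
def Spec_f (x : String) (out : List String) : Prop := out = f_alt x
instance (x : String) (out : List String) : Decidable (Spec_f x out) := by unfold Spec_f; infer_instance

-- ===== CLAIM (what is proved, stated in full; the proofs are below) =====
def Claim_equal_f : Prop := ∀ (x : String), Dom_f x → Spec_f x (f x)

-- ===== LEMMAS AND PROOFS =====

-- the '.'-joins of the suffixes of l, longest first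
def sufJoins : List String → List String
  | [] => []
  | a :: t => PySem.Str.join "." (a :: t) :: sufJoins t

theorem fLoop_eq_foldl (l : List String) : ∀ q, fLoop q l = List.foldl PySem.Set.add q (sufJoins l) := by
  induction l with
  | nil => intro q; rw [fLoop]; rfl
  | cons a t ih =>
      intro q
      rw [fLoop, PySem.List.slice_from _ (by norm_num)]
      simpa [sufJoins] using ih _

theorem join_singleton (a : String) : PySem.Str.join "." [a] = a := by
  apply String.toList_inj.mp
  simp [PySem.Str.toList_join, PySem.Chars.join_singleton]

theorem dotPlus_join (a b : String) (t : List String) :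
    dotPlus a (PySem.Str.join "." (b :: t)) = PySem.Str.join "." (a :: b :: t) := by
  apply String.toList_inj.mp
  simp [dotPlus, PySem.Str.toList_join, PySem.Chars.join_cons_cons, String.toList_ofList]

theorem bFold_eq (l : List String) :
    l.reverse.foldl
      (fun (st : List String × Option String) p =>
        let acc := match st.2 with
          | none => p
          | some a => dotPlus p a
        (st.1 ++ [acc], some acc)) ([], none)
    = ((sufJoins l).reverse, (sufJoins l).head?) := by
  induction l with
  | nil => rfl
  | cons a t ih =>
      rw [List.reverse_cons, List.foldl_append, ih]
      cases t with
      | nil => simp [sufJoins, join_singleton]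
      | cons b t' => simp [sufJoins, dotPlus_join]

-- ===== VERDICT (by name: the statement is the Claim_ definition above) =====
theorem f_spec : Claim_equal_f := by
  intro x _
  show f x = f_alt x
  simp only [f, f_alt]
  rw [bFold_eq, fLoop_eq_foldl]
  simp [← PySem.Set.ofList_eq_foldl, PySem.Set.empty]
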